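-- pv_equiv track=rewrite | github.com/aogundimu/python_stuff | principle_of_computing/Algorithmic_thinking/Part 2/Week 4/project_sub.py | build_scoring_matrix
-- ===== SOURCE A (Python) =====
-- def build_scoring_matrix(alphabet, diag_score, off_diag_score, dash_score):
--     """
--     The function creates a scoring matrix in the form a dict of dicts. This is
--     based on the values specified in the arguments.
--     """
--
--     local_alphabet = alphabet.union( set(['-']) )
--     result = {}
--
--     for char in local_alphabet:
--         curr_dict = {}
--         for sec_char in local_alphabet:
--             if sec_char == char:
--                 if sec_char == '-':
--                     curr_dict.update({sec_char: dash_score})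
--                 else:
--                     curr_dict.update({sec_char: diag_score})
--             elif sec_char == '-':
--                 curr_dict.update({sec_char: dash_score})
--             else:
--                 if char == '-':
--                     curr_dict.update({sec_char: dash_score})
--                 else:
--                     curr_dict.update({sec_char: off_diag_score})
--
--         result.update({char: curr_dict})
--
--     return result
-- ===== SOURCE B (Python) =====
-- def build_scoring_matrix(alphabet, diag_score, off_diag_score, dash_score):
--     """Column-major (transposed) construction: create all empty rows first,
--     then install the matrix one COLUMN at a time.  The dash column is a uniform
--     fill; a letter column is filled with off_diag_score and then its two special
--     cells (the diagonal and the dash row) are fixed up, so no per-cell branch is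
--     needed."""
--     local_alphabet = set(alphabet) | {'-'}
--     rows = {c: {} for c in local_alphabet}
--     for col in local_alphabet:
--         if col == '-':
--             for row in local_alphabet:
--                 rows[row]['-'] = dash_score
--         else:
--             for row in local_alphabet:
--                 rows[row][col] = off_diag_score
--             rows[col][col] = diag_score
--             rows['-'][col] = dash_score
--     return rows
-- ===== Notes on version B (the rewrite author's own statement) =====
-- stated objective: alternative
-- what changed: B transposes the traversal: instead of A's row-major nested loop deciding each cell with a four-way branch, B creates all empty rows and installs the matrix one column at a time, case-splitting per COLUMN (uniform dash-column fill vs letter-column fill with two fix-ups), with a proof that the transposed insertion order yields the same dict.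
import Mathlib
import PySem

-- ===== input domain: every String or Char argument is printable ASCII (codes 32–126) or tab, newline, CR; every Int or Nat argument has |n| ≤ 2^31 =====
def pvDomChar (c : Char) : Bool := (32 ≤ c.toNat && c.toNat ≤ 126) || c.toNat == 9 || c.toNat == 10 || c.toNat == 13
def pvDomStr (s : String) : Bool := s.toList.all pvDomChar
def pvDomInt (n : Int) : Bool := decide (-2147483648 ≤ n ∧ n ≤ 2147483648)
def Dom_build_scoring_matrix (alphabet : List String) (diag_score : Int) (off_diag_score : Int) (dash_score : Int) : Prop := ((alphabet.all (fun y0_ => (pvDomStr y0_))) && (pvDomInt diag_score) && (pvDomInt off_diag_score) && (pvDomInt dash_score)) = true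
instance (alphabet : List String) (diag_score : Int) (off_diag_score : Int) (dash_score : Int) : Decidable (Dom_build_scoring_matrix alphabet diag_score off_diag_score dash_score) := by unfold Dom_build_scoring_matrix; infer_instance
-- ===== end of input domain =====

-- B builds the matrix TRANSPOSED in time: empty rows first, then one COLUMN at a time
-- (uniform dash-column fill vs letter-column fill plus two fix-ups) instead of A's
-- row-major nested loop with a four-way branch per cell; same cost, different traversal.

-- ===== PORT A =====
def build_scoring_matrix (alphabet : List String) (diag_score : Int) (off_diag_score : Int) (dash_score : Int) : List (String × List (String × Int)) :=
  let loc := PySem.Set.union (PySem.Set.ofList alphabet) (PySem.Set.ofList ["-"])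
  let result := loc.foldl (fun (res : PySem.Dict String (PySem.Dict String Int)) ch =>
      let curr := loc.foldl (fun (cd : PySem.Dict String Int) sec =>
          if sec == ch then
            if sec == "-" then cd.insert sec dash_score else cd.insert sec diag_score
          else if sec == "-" then cd.insert sec dash_score
          else if ch == "-" then cd.insert sec dash_score
          else cd.insert sec off_diag_score)
        PySem.Dict.empty
      res.insert ch curr) PySem.Dict.empty
  result.items.map (fun p => (p.1, p.2.items))

-- ===== PORT B =====
-- B-side helper: the body of B's outer (per-column) loop
def colStepFn (loc : List String) (d o s : Int) (S : PySem.Dict String (PySem.Dict String Int)) (col : String) : PySem.Dict String (PySem.Dict String Int) :=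
  if col == "-" then
    loc.foldl (fun S r => S.modify r PySem.Dict.empty (fun row => row.insert "-" s)) S
  else
    let s1 := loc.foldl (fun S r => S.modify r PySem.Dict.empty (fun row => row.insert col o)) S
    let s2 := s1.modify col PySem.Dict.empty (fun row => row.insert col d)
    s2.modify "-" PySem.Dict.empty (fun row => row.insert col s)

def build_scoring_matrix_alt (alphabet : List String) (diag_score : Int) (off_diag_score : Int) (dash_score : Int) : List (String × List (String × Int)) :=
  let loc := PySem.Set.union (PySem.Set.ofList alphabet) (PySem.Set.ofList ["-"])
  let rows := loc.foldl (fun (res : PySem.Dict String (PySem.Dict String Int)) c =>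
      res.insert c PySem.Dict.empty) PySem.Dict.empty
  let final := loc.foldl (colStepFn loc diag_score off_diag_score dash_score) rows
  final.items.map (fun p => (p.1, p.2.items))

-- ===== PRECONDITION & SPEC =====
def Spec_build_scoring_matrix (alphabet : List String) (diag_score : Int) (off_diag_score : Int) (dash_score : Int) (out : List (String × List (String × Int))) : Prop := out = build_scoring_matrix_alt alphabet diag_score off_diag_score dash_score
instance (alphabet : List String) (diag_score : Int) (off_diag_score : Int) (dash_score : Int) (out : List (String × List (String × Int))) : Decidable (Spec_build_scoring_matrix alphabet diag_score off_diag_score dash_score out) := by unfold Spec_build_scoring_matrix; infer_instance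

-- ===== CLAIM (what is proved, stated in full; the proofs are below) =====
def Claim_equal_build_scoring_matrix : Prop := ∀ (alphabet : List String) (diag_score : Int) (off_diag_score : Int) (dash_score : Int), Dom_build_scoring_matrix alphabet diag_score off_diag_score dash_score → Spec_build_scoring_matrix alphabet diag_score off_diag_score dash_score (build_scoring_matrix alphabet diag_score off_diag_score dash_score)

-- ===== LEMMAS AND PROOFS =====

-- the common cell value: dash row/column wins, then the diagonal, else off-diagonal
def cellV (d o s : Int) (c x : String) : Int :=
  if x = "-" ∨ c = "-" then s else if x = c then d else o

-- ---- A side: each row, then the whole table, is a map over loc of the cell value ----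
theorem rowA_items (loc : List String) (hnd : loc.Nodup) (ch : String) (d o s : Int) :
    (loc.foldl (fun (cd : PySem.Dict String Int) sec =>
        if sec == ch then
          if sec == "-" then cd.insert sec s else cd.insert sec d
        else if sec == "-" then cd.insert sec s
        else if ch == "-" then cd.insert sec s
        else cd.insert sec o) PySem.Dict.empty).items
      = loc.map (fun x => (x, cellV d o s ch x)) := by
  have hfun : (fun (cd : PySem.Dict String Int) sec =>
        if sec == ch then
          if sec == "-" then cd.insert sec s else cd.insert sec d
        else if sec == "-" then cd.insert sec s
        else if ch == "-" then cd.insert sec s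
        else cd.insert sec o)
      = fun (cd : PySem.Dict String Int) sec => cd.insert sec (cellV d o s ch sec) := by
    funext cd sec
    by_cases h1 : sec = ch <;> by_cases h2 : sec = "-" <;> by_cases h3 : ch = "-" <;>
      simp_all [cellV]
  rw [hfun]
  have := PySem.Dict.items_foldl_insert_fresh loc (fun x => x) (fun x => cellV d o s ch x)
    PySem.Dict.empty (by intro a _; simp) (by simpa using hnd)
  simpa using this

theorem buildA_canon (loc : List String) (hnd : loc.Nodup) (d o s : Int) :
    ((loc.foldl (fun (res : PySem.Dict String (PySem.Dict String Int)) ch =>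
        res.insert ch (loc.foldl (fun (cd : PySem.Dict String Int) sec =>
          if sec == ch then
            if sec == "-" then cd.insert sec s else cd.insert sec d
          else if sec == "-" then cd.insert sec s
          else if ch == "-" then cd.insert sec s
          else cd.insert sec o) PySem.Dict.empty)) PySem.Dict.empty).items).map (fun p => (p.1, p.2.items))
      = loc.map (fun c => (c, loc.map (fun x => (x, cellV d o s c x)))) := by
  have hitems := PySem.Dict.items_foldl_insert_fresh loc (fun x => x)
    (fun ch => loc.foldl (fun (cd : PySem.Dict String Int) sec =>
          if sec == ch then
            if sec == "-" then cd.insert sec s else cd.insert sec d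
          else if sec == "-" then cd.insert sec s
          else if ch == "-" then cd.insert sec s
          else cd.insert sec o) PySem.Dict.empty)
    PySem.Dict.empty (by intro a _; simp) (by simpa using hnd)
  beta_reduce at hitems
  rw [hitems]
  simp only [show (PySem.Dict.empty : PySem.Dict String (PySem.Dict String Int)).items = [] from rfl,
    List.nil_append, List.map_map]
  refine List.map_congr_left ?_
  intro ch _
  exact congrArg (fun l => (ch, l)) (rowA_items loc hnd ch d o s)

-- ---- B side ----

-- a single modify at a present key keeps the key list
theorem keys_modify_of_mem {ν : Type} (S : PySem.Dict String ν) (k : String) (hk : k ∈ S.keys)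
    (d0 : ν) (f : ν → ν) : (S.modify k d0 f).keys = S.keys := by
  rw [PySem.Dict.keys_modify, PySem.Dict.keys_insert_of_contains _ _
    ((PySem.Dict.contains_iff_mem_keys S k).mpr hk)]

-- a modify pass over keys all present keeps the key list
theorem keys_foldl_modify_of_mem {ν : Type} (l : List String) :
    ∀ (S : PySem.Dict String ν), (∀ r ∈ l, r ∈ S.keys) → ∀ (d0 : ν) (f : String → ν → ν),
    (l.foldl (fun S r => S.modify r d0 (f r)) S).keys = S.keys := by
  induction l with
  | nil => intro S _ d0 f; rfl
  | cons r l ih =>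
      intro S hl d0 f
      rw [List.foldl_cons, ih _ (fun a ha => by
          rw [keys_modify_of_mem S r (hl r List.mem_cons_self) d0 (f r)]
          exact hl a (List.mem_cons_of_mem _ ha)),
        keys_modify_of_mem S r (hl r List.mem_cons_self) d0 (f r)]

-- a uniform modify pass over distinct keys acts pointwise
theorem getD_foldl_modify_uniform {ν : Type} (l : List String) (hnd : l.Nodup) :
    ∀ (S : PySem.Dict String ν) (d0 : ν) (f : ν → ν) (c : String),
    (l.foldl (fun S r => S.modify r d0 f) S).getD c d0
      = if c ∈ l then f (S.getD c d0) else S.getD c d0 := by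
  induction l with
  | nil => intro S d0 f c; simp
  | cons r l ih =>
      intro S d0 f c
      rw [List.foldl_cons, ih (List.nodup_cons.mp hnd).2 _ d0 f c, PySem.Dict.getD_modify]
      by_cases h1 : c ∈ l <;> by_cases h2 : c = r <;>
        simp_all [List.nodup_cons.mp hnd]

-- one column step of B: every row of loc gets the column's cell value appended
theorem colStep (loc : List String) (hnd : loc.Nodup) (hdash : "-" ∈ loc) (d o s : Int)
    (col : String) (hcm : col ∈ loc) (S : PySem.Dict String (PySem.Dict String Int)) (hk : S.keys = loc) :
    (colStepFn loc d o s S col).keys = loc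
    ∧ ∀ c ∈ loc, (colStepFn loc d o s S col).getD c PySem.Dict.empty
        = (S.getD c PySem.Dict.empty).insert col (cellV d o s c col) := by
  by_cases hcol : col = "-"
  · subst hcol
    simp only [colStepFn, BEq.rfl, if_true]
    refine ⟨by rw [keys_foldl_modify_of_mem loc S (fun r hr => hk ▸ hr), hk], fun c hc => ?_⟩
    rw [getD_foldl_modify_uniform loc hnd S _ _ c, if_pos hc]
    simp [cellV]
  · have hbeq : (col == "-") = false := by simp [hcol]
    simp only [colStepFn, hbeq]
    rw [if_neg Bool.false_ne_true]
    have hk1 : (loc.foldl (fun S r => S.modify r PySem.Dict.empty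
        (fun row => row.insert col o)) S).keys = loc := by
      rw [keys_foldl_modify_of_mem loc S (fun r hr => hk ▸ hr), hk]
    have hk2 : ((loc.foldl (fun S r => S.modify r PySem.Dict.empty
        (fun row => row.insert col o)) S).modify col PySem.Dict.empty
        (fun row => row.insert col d)).keys = loc := by
      rw [keys_modify_of_mem _ col (by rw [hk1]; exact hcm), hk1]
    refine ⟨by rw [keys_modify_of_mem _ "-" (by rw [hk2]; exact hdash), hk2], fun c hc => ?_⟩
    rw [PySem.Dict.getD_modify]
    by_cases h1 : c = "-"
    · subst h1
      rw [if_pos rfl, PySem.Dict.getD_modify, if_neg (fun h => hcol h.symm),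
        getD_foldl_modify_uniform loc hnd S _ _ "-", if_pos hdash,
        PySem.Dict.insert_insert_self]
      simp [cellV]
    · rw [if_neg h1, PySem.Dict.getD_modify]
      by_cases h2 : c = col
      · subst h2
        rw [if_pos rfl, getD_foldl_modify_uniform loc hnd S _ _ c, if_pos hc,
          PySem.Dict.insert_insert_self]
        simp [cellV, h1]
      · have h3 : ¬ col = c := fun h => h2 h.symm
        rw [if_neg h2, getD_foldl_modify_uniform loc hnd S _ _ c, if_pos hc]
        simp [cellV, h1, h3, hcol]

-- B's column pass establishes the canonical rows
theorem colFold (loc : List String) (hnd : loc.Nodup) (hdash : "-" ∈ loc) (d o s : Int) :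
    ∀ (q p : List String), loc = p ++ q → ∀ S : PySem.Dict String (PySem.Dict String Int),
    S.keys = loc →
    (∀ c ∈ loc, (S.getD c PySem.Dict.empty).items = p.map (fun x => (x, cellV d o s c x))) →
    (q.foldl (colStepFn loc d o s) S).keys = loc
    ∧ ∀ c ∈ loc, ((q.foldl (colStepFn loc d o s) S).getD c PySem.Dict.empty).items
        = loc.map (fun x => (x, cellV d o s c x)) := by
  intro q
  induction q with
  | nil =>
      intro p hpq S hk hrows
      refine ⟨hk, fun c hc => ?_⟩
      rw [List.foldl_nil, hrows c hc, hpq, List.append_nil]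
  | cons col q ih =>
      intro p hpq S hk hrows
      have hcm : col ∈ loc := hpq ▸ List.mem_append.mpr (Or.inr List.mem_cons_self)
      have hstep := colStep loc hnd hdash d o s col hcm S hk
      rw [List.foldl_cons]
      refine ih (p ++ [col]) (by rw [hpq]; simp) _ hstep.1 (fun c hc => ?_)
      rw [hstep.2 c hc, PySem.Dict.items_insert_of_not_contains, hrows c hc]
      · simp
      · have hnodup : ¬ col ∈ p := by
          intro hmem
          have h4 := hpq ▸ hnd
          rw [List.nodup_append] at h4
          exact h4.2.2 col hmem col List.mem_cons_self rfl
        have hkeys : (S.getD c PySem.Dict.empty).keys = p := by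
          show ((S.getD c PySem.Dict.empty).items).map Prod.fst = p
          rw [hrows c hc, List.map_map]; simp [Function.comp_def]
        rw [Bool.eq_false_iff]
        intro hcont
        exact hnodup (hkeys ▸ (PySem.Dict.contains_iff_mem_keys _ _).mp hcont)

-- the initial table of empty rows
theorem initRows (loc : List String) (hnd : loc.Nodup) :
    (loc.foldl (fun (res : PySem.Dict String (PySem.Dict String Int)) c =>
      res.insert c PySem.Dict.empty) PySem.Dict.empty).keys = loc
    ∧ ∀ c ∈ loc, ((loc.foldl (fun (res : PySem.Dict String (PySem.Dict String Int)) c =>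
      res.insert c PySem.Dict.empty) PySem.Dict.empty).getD c PySem.Dict.empty) = PySem.Dict.empty := by
  have hitems := PySem.Dict.items_foldl_insert_fresh loc (fun x => x)
    (fun _ => (PySem.Dict.empty : PySem.Dict String Int))
    PySem.Dict.empty (by intro a _; simp) (by simpa using hnd)
  beta_reduce at hitems
  have hkeys : (loc.foldl (fun (res : PySem.Dict String (PySem.Dict String Int)) c =>
      res.insert c PySem.Dict.empty) PySem.Dict.empty).keys = loc := by
    show _root_.List.map Prod.fst _ = loc
    rw [show (_root_.List.map Prod.fst (loc.foldl (fun (res : PySem.Dict String (PySem.Dict String Int)) c => res.insert c PySem.Dict.empty) PySem.Dict.empty).items) = _root_.List.map Prod.fst ((PySem.Dict.empty : PySem.Dict String (PySem.Dict String Int)).items ++ loc.map (fun a => (a, PySem.Dict.empty))) from congrArg _ hitems]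
    simp [show (PySem.Dict.empty : PySem.Dict String (PySem.Dict String Int)).items = [] from rfl,
      Function.comp_def]
  refine ⟨hkeys, fun c hc => ?_⟩
  apply PySem.Dict.getD_of_mem_items
  · rw [hitems]
    simp only [show (PySem.Dict.empty : PySem.Dict String (PySem.Dict String Int)).items = [] from rfl, List.nil_append]
    exact List.mem_map.mpr ⟨c, hc, rfl⟩
  · rw [hkeys]; exact hnd

theorem buildB_canon (loc : List String) (hnd : loc.Nodup) (hdash : "-" ∈ loc) (d o s : Int) :
    ((loc.foldl (colStepFn loc d o s)
      (loc.foldl (fun (res : PySem.Dict String (PySem.Dict String Int)) c =>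
        res.insert c PySem.Dict.empty) PySem.Dict.empty)).items).map (fun p => (p.1, p.2.items))
      = loc.map (fun c => (c, loc.map (fun x => (x, cellV d o s c x)))) := by
  have hinit := initRows loc hnd
  have hfold := colFold loc hnd hdash d o s loc [] rfl _ hinit.1
    (fun c hc => by rw [hinit.2 c hc]; rfl)
  rw [PySem.Dict.items_eq_map_keys _ (by rw [hfold.1]; exact hnd) PySem.Dict.empty, hfold.1,
    List.map_map]
  refine List.map_congr_left (fun c hc => ?_)
  simp only [Function.comp_apply]
  rw [hfold.2 c hc]

-- ===== VERDICT (by name: the statement is the Claim_ definition above) =====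
theorem build_scoring_matrix_spec : Claim_equal_build_scoring_matrix := by
  intro alphabet d o s _
  unfold Spec_build_scoring_matrix build_scoring_matrix build_scoring_matrix_alt
  have hnd : (PySem.Set.union (PySem.Set.ofList alphabet) (PySem.Set.ofList ["-"])).Nodup :=
    PySem.Set.nodup_union _ _ (PySem.Set.nodup_ofList _)
  have hdash : "-" ∈ PySem.Set.union (PySem.Set.ofList alphabet) (PySem.Set.ofList ["-"]) := by
    rw [PySem.Set.mem_union]
    exact Or.inr (by rw [PySem.Set.mem_ofList]; simp)
  rw [buildA_canon _ hnd, buildB_canon _ hnd hdash]
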